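-- pv_equiv track=rewrite | github.com/joaotav/misc-client-servers | dijkstra-network-routing/roteamento.py | createDot
-- ===== SOURCE A (Python) =====
-- def createDot(pathList):
--     edgesList = []
--     dotList = []
--     intermediateList = []
--     for item in range(len(pathList) - 1):
--         if pathList[item] == '-':
--             continue
--         if pathList[item + 1] != '-':
--             edgesList.append(pathList[item])
--             edgesList.append(pathList[item + 1])
--             edgesList.append('*')
--
--     for item in range(len(edgesList) - 1):
--         if (edgesList[item] == '*') or (edgesList[item+1] == '*'):
--             continue
--         intermediateList.append(str(edgesList[item]) + ' -- ' + str(edgesList[item+1]))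
--
--     for item in intermediateList:
--         if item not in dotList:
--             dotList.append(item)
--     return dotList
-- ===== SOURCE B (Python) =====
-- def createDot(pathList):
--     dotList = []
--     for i in range(len(pathList) - 1):
--         a, b = pathList[i], pathList[i + 1]
--         if a == '-' or b == '-':
--             continue
--         edge = str(a) + ' -- ' + str(b)
--         if edge not in dotList:
--             dotList.append(edge)
--     return dotList
-- ===== Notes on version B (the rewrite author's own statement) =====
-- stated objective: simpler
-- what changed: Replaced A's three passes (building a '*'-sentinel-separated edgesList, re-scanning its adjacent pairs to rebuild edge strings, then a dedup pass) with one direct loop over adjacent path pairs that appends each new 'a -- b' edge if not already in the result, eliminating the intermediate representation entirely.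
-- intended difference: On inputs with an adjacent pair (a,b), both different from '-', where a or b is the literal string '*', A's sentinel collides with the data and A silently drops that edge, returning a list without it, while B returns the intended edge string a -- b there. — e.g. on createDot(["*", "x"]): A returns [], B returns ["* -- x"]
import Mathlib
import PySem

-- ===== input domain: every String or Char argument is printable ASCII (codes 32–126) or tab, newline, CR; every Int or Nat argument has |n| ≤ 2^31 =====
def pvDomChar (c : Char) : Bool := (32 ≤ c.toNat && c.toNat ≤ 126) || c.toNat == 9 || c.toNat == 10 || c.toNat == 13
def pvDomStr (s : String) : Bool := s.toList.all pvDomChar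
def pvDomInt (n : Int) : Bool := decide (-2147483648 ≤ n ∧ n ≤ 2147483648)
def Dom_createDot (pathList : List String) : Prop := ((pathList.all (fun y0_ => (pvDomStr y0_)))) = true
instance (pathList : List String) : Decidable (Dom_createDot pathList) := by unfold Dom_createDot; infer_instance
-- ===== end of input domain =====

-- B collapses A's three passes (sentinel-separated edgesList, re-scan, dedup) into one
-- direct pass over adjacent pairs with first-seen dedup (objective: simpler); on inputs
-- containing a "*" element in a kept pair, A drops that edge (sentinel collision) while B
-- keeps it — stated as the intended difference D_ below.

-- ===== PORT A =====
-- indices produced by List.range (len-1) are always in range, so getD is exact for pathList[i]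
def createDot (pathList : List String) : List String :=
  let edgesList := (List.range (pathList.length - 1)).foldl
    (fun es i =>
      if pathList.getD i "" = "-" then es
      else if pathList.getD (i+1) "" ≠ "-" then
        es ++ [pathList.getD i "", pathList.getD (i+1) "", "*"]
      else es) []
  let intermediateList := (List.range (edgesList.length - 1)).foldl
    (fun acc i =>
      if edgesList.getD i "" = "*" ∨ edgesList.getD (i+1) "" = "*" then acc
      else acc ++ [edgesList.getD i "" ++ " -- " ++ edgesList.getD (i+1) ""]) []
  intermediateList.foldl (fun dot item => if item ∈ dot then dot else dot ++ [item]) []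

-- ===== PORT B =====
def createDot_alt (pathList : List String) : List String :=
  (List.range (pathList.length - 1)).foldl
    (fun dot i =>
      let a := pathList.getD i ""
      let b := pathList.getD (i+1) ""
      if a = "-" ∨ b = "-" then dot
      else
        let edge := a ++ " -- " ++ b
        if edge ∈ dot then dot else dot ++ [edge]) []

-- ===== PRECONDITION & SPEC =====
-- On inputs with an adjacent pair (a,b), both ≠ "-", where a or b is the string "*", A's
-- "*" sentinel collides with the data and A silently drops that edge from the output,
-- while B returns the edge "a -- b" as intended for a DOT edge list.
def D_createDot (pathList : List String) : Prop :=
  ∃ pr ∈ pathList.zip pathList.tail,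
    pr.1 ≠ "-" ∧ pr.2 ≠ "-" ∧ (pr.1 = "*" ∨ pr.2 = "*")
instance (pathList : List String) : Decidable (D_createDot pathList) := by
  unfold D_createDot; infer_instance

def Spec_createDot (pathList : List String) (out : List String) : Prop :=
  ¬ D_createDot pathList → out = createDot_alt pathList
instance (pathList : List String) (out : List String) : Decidable (Spec_createDot pathList out) := by
  unfold Spec_createDot; infer_instance

def pvDiffWitness_createDot : List String := ["*", "x"]
def pvDiffWitnessOut_createDot : (List String) × (List String) := ([], ["* -- x"])

-- ===== CLAIM (what is proved, stated in full; the proofs are below) =====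
def Claim_unchanged_createDot : Prop :=
  ∀ (pathList : List String), Dom_createDot pathList → Spec_createDot pathList (createDot pathList)
def Claim_changed_createDot : Prop :=
  Dom_createDot (pvDiffWitness_createDot) ∧ D_createDot (pvDiffWitness_createDot) ∧
  createDot (pvDiffWitness_createDot) = pvDiffWitnessOut_createDot.1 ∧
  createDot_alt (pvDiffWitness_createDot) = pvDiffWitnessOut_createDot.2 ∧
  pvDiffWitnessOut_createDot.1 ≠ pvDiffWitnessOut_createDot.2

-- ===== LEMMAS AND PROOFS =====

-- adjacent-pair view of an index loop over range (len-1)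
theorem range_map_adjacent (l : List String) :
    (List.range (l.length - 1)).map (fun i => (l.getD i "", l.getD (i+1) "")) = l.zip l.tail := by
  apply List.ext_getElem
  · simp
  · intro i h1 h2
    have hlen : i + 1 < l.length := by simp at h1; omega
    simp [List.getD_eq_getElem?_getD, hlen, Nat.lt_of_succ_lt hlen, List.getElem_tail]

theorem foldl_range_adjacent {α : Type} (l : List String) (f : α → String × String → α) (init : α) :
    (List.range (l.length - 1)).foldl (fun a i => f a (l.getD i "", l.getD (i+1) "")) init
      = (l.zip l.tail).foldl f init := by
  rw [← range_map_adjacent l, List.foldl_map]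

def pvValid (pr : String × String) : Bool := !(pr.1 == "-") && !(pr.2 == "-")

def pvTrip (pr : String × String) : List String := [pr.1, pr.2, "*"]

def pvEdge (pr : String × String) : String := pr.1 ++ " -- " ++ pr.2

def pvIns (dot : List String) (e : String) : List String := if e ∈ dot then dot else dot ++ [e]

-- structural form of A's second (re-scan) pass
def pass2 : List String → List String
  | x :: y :: rest =>
      (if x = "*" ∨ y = "*" then [] else [x ++ " -- " ++ y]) ++ pass2 (y :: rest)
  | _ => []

theorem pass2_nil : pass2 [] = [] := rfl
theorem pass2_single (x : String) : pass2 [x] = [] := rfl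
theorem pass2_cons2 (x y : String) (r : List String) :
    pass2 (x :: y :: r) = (if x = "*" ∨ y = "*" then [] else [x ++ " -- " ++ y]) ++ pass2 (y :: r) := rfl

theorem pass2_fold (l : List String) (acc : List String) :
    (l.zip l.tail).foldl
        (fun a pr => if pr.1 = "*" ∨ pr.2 = "*" then a else a ++ [pr.1 ++ " -- " ++ pr.2]) acc
      = acc ++ pass2 l := by
  induction l generalizing acc with
  | nil => simp [pass2_nil]
  | cons x rest ih =>
    cases rest with
    | nil => simp [pass2_single]
    | cons y r =>
      simp only [List.tail_cons, List.zip_cons_cons, List.foldl_cons]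
      have := ih (acc := if x = "*" ∨ y = "*" then acc else acc ++ [x ++ " -- " ++ y])
      simp only [List.tail_cons] at this
      rw [this, pass2_cons2]
      split_ifs <;> simp

theorem pass2_triples (t : List (String × String))
    (h : ∀ pr ∈ t, pr.1 ≠ "*" ∧ pr.2 ≠ "*") :
    pass2 (t.flatMap pvTrip) = t.map pvEdge := by
  induction t with
  | nil => simp [pass2_nil]
  | cons pr t' ih =>
    have hpr := h pr (by simp)
    have ih' := ih (fun q hq => h q (by simp [hq]))
    cases t' with
    | nil =>
      simp only [List.flatMap_cons, List.flatMap_nil, List.append_nil, pvTrip]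
      rw [pass2_cons2, pass2_cons2, pass2_single]
      simp [pvEdge, hpr.1, hpr.2]
    | cons q t'' =>
      simp only [List.flatMap_cons, pvTrip, List.cons_append, List.nil_append] at ih' ⊢
      rw [pass2_cons2, pass2_cons2, pass2_cons2]
      simp [pvEdge, hpr.1, hpr.2, ih']

theorem flatMap_ite (l : List (String × String)) :
    l.flatMap (fun pr => if pvValid pr then pvTrip pr else [])
      = (l.filter pvValid).flatMap pvTrip := by
  induction l with
  | nil => rfl
  | cons pr l ih =>
    by_cases h : pvValid pr <;> simp [h, ih]

theorem foldl_skip_map {α β γ : Type} (c : β → Bool) (f : β → γ) (g : α → γ → α)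
    (l : List β) (acc : α) :
    l.foldl (fun a x => if c x then g a (f x) else a) acc
      = ((l.filter c).map f).foldl g acc := by
  induction l generalizing acc with
  | nil => rfl
  | cons x l ih =>
    by_cases h : c x <;> simp [h, ih]

-- A's output, characterised
theorem createDot_eq (p : List String)
    (h : ∀ pr ∈ (p.zip p.tail).filter pvValid, pr.1 ≠ "*" ∧ pr.2 ≠ "*") :
    createDot p = (((p.zip p.tail).filter pvValid).map pvEdge).foldl pvIns [] := by
  simp only [createDot]
  have e1 : (List.range (p.length - 1)).foldl
      (fun es i =>
        if p.getD i "" = "-" then es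
        else if p.getD (i+1) "" ≠ "-" then es ++ [p.getD i "", p.getD (i+1) "", "*"]
        else es) []
      = ((p.zip p.tail).filter pvValid).flatMap pvTrip := by
    have step : (fun (es : List String) (i : Nat) =>
        if p.getD i "" = "-" then es
        else if p.getD (i+1) "" ≠ "-" then es ++ [p.getD i "", p.getD (i+1) "", "*"]
        else es)
        = fun es i => (fun a (pr : String × String) =>
            a ++ (if pvValid pr then pvTrip pr else [])) es (p.getD i "", p.getD (i+1) "") := by
      funext es i
      simp only [pvValid, pvTrip]
      split_ifs <;> simp_all
    rw [step,
      foldl_range_adjacent p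
        (fun a (pr : String × String) => a ++ (if pvValid pr then pvTrip pr else [])) [],
      PySem.List.foldl_append_eq_flatMap, flatMap_ite, List.nil_append]
  rw [e1]
  have e2 : ∀ (E : List String), E = ((p.zip p.tail).filter pvValid).flatMap pvTrip →
      (List.range (E.length - 1)).foldl
        (fun acc i =>
          if E.getD i "" = "*" ∨ E.getD (i+1) "" = "*" then acc
          else acc ++ [E.getD i "" ++ " -- " ++ E.getD (i+1) ""]) []
      = ((p.zip p.tail).filter pvValid).map pvEdge := by
    intro E hE
    rw [foldl_range_adjacent E
        (fun a (pr : String × String) =>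
          if pr.1 = "*" ∨ pr.2 = "*" then a else a ++ [pr.1 ++ " -- " ++ pr.2]) [],
      pass2_fold, List.nil_append, hE, pass2_triples _ h]
  rw [e2 _ rfl]
  rfl

-- B's output, characterised
theorem createDot_alt_eq (p : List String) :
    createDot_alt p = (((p.zip p.tail).filter pvValid).map pvEdge).foldl pvIns [] := by
  simp only [createDot_alt]
  have step : (fun (dot : List String) (i : Nat) =>
      let a := p.getD i ""
      let b := p.getD (i+1) ""
      if a = "-" ∨ b = "-" then dot
      else
        let edge := a ++ " -- " ++ b
        if edge ∈ dot then dot else dot ++ [edge])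
      = fun dot i => (fun a (pr : String × String) =>
          if pvValid pr then pvIns a (pvEdge pr) else a) dot (p.getD i "", p.getD (i+1) "") := by
    funext dot i
    simp only [pvValid, pvIns, pvEdge]
    split_ifs <;> simp_all
  rw [step,
    foldl_range_adjacent p
      (fun a (pr : String × String) => if pvValid pr then pvIns a (pvEdge pr) else a) [],
    foldl_skip_map pvValid pvEdge pvIns]

-- ===== VERDICT (by name: the statement is the Claim_ definition above) =====
theorem createDot_spec : Claim_unchanged_createDot := by
  intro p _
  unfold Spec_createDot
  intro hD
  have h : ∀ pr ∈ (p.zip p.tail).filter pvValid, pr.1 ≠ "*" ∧ pr.2 ≠ "*" := by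
    intro pr hpr
    simp only [List.mem_filter, pvValid, Bool.and_eq_true, Bool.not_eq_true',
      beq_eq_false_iff_ne] at hpr
    by_contra hc
    exact hD ⟨pr, hpr.1, hpr.2.1, hpr.2.2, by tauto⟩
  rw [createDot_eq p h, createDot_alt_eq p]

theorem createDot_changed : Claim_changed_createDot := by
  unfold Claim_changed_createDot; decide
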